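-- pv_equiv track=rewrite | github.com/hastonng/Authentication-Privilege | Huawei_Authentication_Privellege_WEUDOC/network_process.py | checkExportStatus
-- ===== SOURCE A (Python) =====
-- def checkExportStatus(dict, itemName):
--     """
--     Check the status of the file if it is success
--     :param res_dict:
--     :return: True/False
--     """
--
--     check_list = []
--
--     for items in dict['result']:
--         check_list.append(items[itemName])
--
--     check_list = set(check_list)
--
--     # 0 = Pending, 1 = Progressing
--     if "0" in check_list or "1" in check_list:
--         check_list.clear()
--         return True
--     # 2 = Success/Completed
--     else:
--         check_list.clear()
--         return False
-- ===== SOURCE B (Python) =====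
-- def checkExportStatus(dict, itemName):
--     return any(items[itemName] in ("0", "1") for items in dict['result'])
-- ===== Notes on version B (the rewrite author's own statement) =====
-- stated objective: idiomatic
-- what changed: Replaces building a list of all statuses, converting it to a set and testing set membership with a single early-exit any() pass that maintains no collection at all.
import Mathlib
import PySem

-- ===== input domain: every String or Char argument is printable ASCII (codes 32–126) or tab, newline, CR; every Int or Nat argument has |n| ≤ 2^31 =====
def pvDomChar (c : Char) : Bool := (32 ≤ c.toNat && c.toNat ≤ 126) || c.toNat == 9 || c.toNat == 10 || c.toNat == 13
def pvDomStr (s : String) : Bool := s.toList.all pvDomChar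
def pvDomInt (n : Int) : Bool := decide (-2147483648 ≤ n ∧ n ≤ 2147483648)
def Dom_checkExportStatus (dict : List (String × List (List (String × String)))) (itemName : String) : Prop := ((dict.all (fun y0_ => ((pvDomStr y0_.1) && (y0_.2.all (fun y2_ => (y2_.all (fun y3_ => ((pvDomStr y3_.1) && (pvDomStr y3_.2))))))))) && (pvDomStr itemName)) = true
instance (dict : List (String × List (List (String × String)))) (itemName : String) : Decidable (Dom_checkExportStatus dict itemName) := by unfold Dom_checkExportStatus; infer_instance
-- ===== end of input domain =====

-- B is the same check written idiomatically: a single early-exit any() pass instead of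
-- building a list, converting it to a set and testing set membership.
-- Equivalence is about the RETURN value; A mutates no argument.

-- ===== PORT A =====
def checkExportStatus (dict : List (String × List (List (String × String)))) (itemName : String) : Bool :=
  -- for items in dict['result']: check_list.append(items[itemName])
  let result := (List.lookup "result" dict).getD []
  let check_list := result.foldl (fun acc items => acc ++ [(List.lookup itemName items).getD ""]) []
  -- check_list = set(check_list)
  let check_set : PySem.Set String := PySem.Set.ofList check_list
  if PySem.Set.contains check_set "0" || PySem.Set.contains check_set "1" then true else false

-- ===== PORT B =====
def checkExportStatus_alt (dict : List (String × List (List (String × String)))) (itemName : String) : Bool :=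
  ((List.lookup "result" dict).getD []).any
    (fun items => (List.lookup itemName items).getD "" == "0" || (List.lookup itemName items).getD "" == "1")

-- ===== PRECONDITION & SPEC =====
-- Pre_ excludes exactly the inputs where Python A raises KeyError: no 'result' key, or some
-- item of dict['result'] lacking the key itemName.
def Pre_checkExportStatus (dict : List (String × List (List (String × String)))) (itemName : String) : Prop :=
  (List.lookup "result" dict).isSome = true ∧
  ∀ items ∈ (List.lookup "result" dict).getD [], (List.lookup itemName items).isSome = true
instance (dict : List (String × List (List (String × String)))) (itemName : String) : Decidable (Pre_checkExportStatus dict itemName) := by unfold Pre_checkExportStatus; infer_instance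

def pvWitness_checkExportStatus : (List (String × List (List (String × String)))) × String :=
  ([("result", [[("status", "0")], [("status", "2")]])], "status")

def Spec_checkExportStatus (dict : List (String × List (List (String × String)))) (itemName : String) (out : Bool) : Prop := out = checkExportStatus_alt dict itemName
instance (dict : List (String × List (List (String × String)))) (itemName : String) (out : Bool) : Decidable (Spec_checkExportStatus dict itemName out) := by unfold Spec_checkExportStatus; infer_instance

-- ===== CLAIM (what is proved, stated in full; the proofs are below) =====
def Claim_equal_checkExportStatus : Prop := ∀ (dict : List (String × List (List (String × String)))) (itemName : String), Dom_checkExportStatus dict itemName → Pre_checkExportStatus dict itemName → Spec_checkExportStatus dict itemName (checkExportStatus dict itemName)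

-- ===== LEMMAS AND PROOFS =====

-- the accumulation loop of A is a map
theorem checkA_list_eq_map (r : List (List (String × String))) (itemName : String) :
    r.foldl (fun acc items => acc ++ [(List.lookup itemName items).getD ""]) []
      = r.map (fun items => (List.lookup itemName items).getD "") := by
  simpa using PySem.List.foldl_append_singleton_eq_map (fun items => (List.lookup itemName items).getD "") r []

theorem set_member_or_eq_any (l : List String) :
    (PySem.Set.contains (PySem.Set.ofList l) "0" || PySem.Set.contains (PySem.Set.ofList l) "1")
      = l.any (fun s => s == "0" || s == "1") := by
  rw [Bool.eq_iff_iff]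
  simp only [Bool.or_eq_true, PySem.Set.contains, List.contains_iff_mem,
    PySem.Set.mem_ofList, List.any_eq_true, beq_iff_eq]
  constructor
  · rintro (h | h)
    · exact ⟨"0", h, Or.inl rfl⟩
    · exact ⟨"1", h, Or.inr rfl⟩
  · rintro ⟨s, hs, h | h⟩ <;> subst h
    · exact Or.inl hs
    · exact Or.inr hs

-- ===== VERDICT (by name: the statement is the Claim_ definition above) =====
theorem checkExportStatus_spec : Claim_equal_checkExportStatus := by
  intro dict itemName _ _
  unfold Spec_checkExportStatus
  simp only [checkExportStatus, checkExportStatus_alt]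
  rw [checkA_list_eq_map, set_member_or_eq_any, List.any_map]
  split <;> simp_all
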